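-- pv_equiv track=rewrite | github.com/rakeshkolipakaace/AI-powered-Chatbot | utils/exam.py | format_questions_to_html
-- ===== SOURCE A (Python) =====
-- def format_questions_to_html(text):
--     lines = text.splitlines()
--     html = ['<div style="font-family: Arial; margin: 20px;">']
--     current_question = None
--     for line in lines:
--         line = line.strip()
--         if not line:
--             continue
--         if line[0].isdigit() and line[1] == '.':  # Question line
--             if current_question:
--                 html.append('</div>')
--             html.append(f'<div style="margin-top: 15px; font-weight: bold;">{line}</div><div style="margin-left: 20px;">')
--             current_question = line
--         else:  # Option line
--             # Handle options on the same line (e.g., "a) ... b) ... c) ... d) ...")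
--             if ' b) ' in line or ' c) ' in line or ' d) ' in line:
--                 # Split by option delimiters
--                 parts = line.replace(' b) ', '||b) ').replace(' c) ', '||c) ').replace(' d) ', '||d) ').split('||')
--                 for opt in parts:
--                     opt = opt.strip()
--                     if opt:
--                         html.append(f'<div>{opt}</div>')
--             else:
--                 html.append(f'<div>{line}</div>')
--     if current_question:
--         html.append('</div>')
--     html.append('</div>')
--     return '\n'.join(html)
-- ===== SOURCE B (Python) =====
-- def _option_texts(line):
--     if ' b) ' in line or ' c) ' in line or ' d) ' in line:
--         parts = line.replace(' b) ', '||b) ').replace(' c) ', '||c) ').replace(' d) ', '||d) ').split('||')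
--         return [p for p in map(str.strip, parts) if p]
--     return [line]
--
--
-- def format_questions_to_html(text):
--     # Phase 1: parse into preamble options and (question, options) groups.
--     preamble = []
--     groups = []
--     for raw in text.splitlines():
--         line = raw.strip()
--         if not line:
--             continue
--         if len(line) > 1 and line[0].isdigit() and line[1] == '.':
--             groups.append((line, []))
--         elif groups:
--             groups[-1][1].extend(_option_texts(line))
--         else:
--             preamble.extend(_option_texts(line))
--     # Phase 2: render.
--     pieces = (['<div style="font-family: Arial; margin: 20px;">']
--               + [f'<div>{o}</div>' for o in preamble]
--               + [piece
--                  for q, opts in groups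
--                  for piece in ([f'<div style="margin-top: 15px; font-weight: bold;">{q}</div><div style="margin-left: 20px;">']
--                                + [f'<div>{o}</div>' for o in opts]
--                                + ['</div>'])]
--               + ['</div>'])
--     return '\n'.join(pieces)
-- ===== Notes on version B (the rewrite author's own statement) =====
-- stated objective: alternative
-- what changed: A interleaves parsing and HTML emission in one loop with a current_question flag; B first parses the text into preamble options plus (question, options) groups, then renders the group structure, closing each question div per group.
import Mathlib
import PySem

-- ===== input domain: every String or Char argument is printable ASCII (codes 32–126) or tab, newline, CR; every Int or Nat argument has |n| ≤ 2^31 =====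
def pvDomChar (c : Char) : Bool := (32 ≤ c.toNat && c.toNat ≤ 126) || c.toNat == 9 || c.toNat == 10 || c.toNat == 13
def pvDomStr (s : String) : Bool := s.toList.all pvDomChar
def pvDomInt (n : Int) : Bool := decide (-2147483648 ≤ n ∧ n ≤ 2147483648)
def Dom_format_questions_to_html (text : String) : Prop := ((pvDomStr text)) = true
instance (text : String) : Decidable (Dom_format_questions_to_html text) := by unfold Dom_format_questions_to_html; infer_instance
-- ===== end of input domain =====

-- B re-decomposes A's single formatting loop into parse-into-groups then render; objective: alternative decomposition, same cost.

-- ===== PORT A =====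
def format_questions_to_html (text : String) : String :=
  let lines := PySem.Str.splitlines text
  let st := lines.foldl (fun (st : List String × Option String) line =>
    let line := PySem.Str.strip line
    if line = "" then st
    else if ((PySem.Str.pyGet? line 0).map PySem.Chars.isdigit).getD false
            && (PySem.Str.pyGet? line 1 == some '.') then
      -- question line (Python's line[1] raises IndexError when the stripped line is a lone digit; Pre_ excludes that)
      let html := if st.2.isSome then st.1 ++ ["</div>"] else st.1
      (html ++ ["<div style=\"margin-top: 15px; font-weight: bold;\">" ++ line ++ "</div><div style=\"margin-left: 20px;\">"],
       some line)
    else if PySem.Str.isIn " b) " line || PySem.Str.isIn " c) " line || PySem.Str.isIn " d) " line then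
      let parts := (PySem.Str.split?
        (PySem.Str.replace (PySem.Str.replace (PySem.Str.replace line " b) " "||b) ") " c) " "||c) ") " d) " "||d) ") "||").getD []
      (parts.foldl (fun h opt =>
          let opt := PySem.Str.strip opt
          if opt = "" then h else h ++ ["<div>" ++ opt ++ "</div>"]) st.1, st.2)
    else (st.1 ++ ["<div>" ++ line ++ "</div>"], st.2))
    (["<div style=\"font-family: Arial; margin: 20px;\">"], (none : Option String))
  let html := if st.2.isSome then st.1 ++ ["</div>"] else st.1
  PySem.Str.join "\n" (html ++ ["</div>"])

-- ===== PORT B =====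
def pvOptionTexts (line : String) : List String :=
  if PySem.Str.isIn " b) " line || PySem.Str.isIn " c) " line || PySem.Str.isIn " d) " line then
    ((((PySem.Str.split?
        (PySem.Str.replace (PySem.Str.replace (PySem.Str.replace line " b) " "||b) ") " c) " "||c) ") " d) " "||d) ") "||").getD []).map
        PySem.Str.strip).filter (fun p => p ≠ ""))
  else [line]

-- groups[-1][1].extend(opts)
def pvAppendLast (groups : List (String × List String)) (opts : List String) : List (String × List String) :=
  match groups with
  | [] => []
  | [(q, os)] => [(q, os ++ opts)]
  | g :: rest => g :: pvAppendLast rest opts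

def format_questions_to_html_alt (text : String) : String :=
  let parsed := (PySem.Str.splitlines text).foldl
    (fun (st : List String × List (String × List String)) raw =>
      let line := PySem.Str.strip raw
      if line = "" then st
      else if decide (1 < PySem.Str.len line)
              && ((PySem.Str.pyGet? line 0).map PySem.Chars.isdigit).getD false
              && (PySem.Str.pyGet? line 1 == some '.') then
        (st.1, st.2 ++ [(line, [])])
      else match st.2 with
        | [] => (st.1 ++ pvOptionTexts line, st.2)
        | _ => (st.1, pvAppendLast st.2 (pvOptionTexts line)))
    (([], []) : List String × List (String × List String))
  let pieces :=
    ["<div style=\"font-family: Arial; margin: 20px;\">"]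
    ++ parsed.1.map (fun o => "<div>" ++ o ++ "</div>")
    ++ parsed.2.flatMap (fun g =>
         ("<div style=\"margin-top: 15px; font-weight: bold;\">" ++ g.1 ++ "</div><div style=\"margin-left: 20px;\">")
         :: (g.2.map (fun o => "<div>" ++ o ++ "</div>") ++ ["</div>"]))
    ++ ["</div>"]
  PySem.Str.join "\n" pieces

-- ===== PRECONDITION & SPEC =====
-- Pre_ excludes texts with a stripped line that is a single digit: there Python A raises IndexError at line[1].
def Pre_format_questions_to_html (text : String) : Prop :=
  ∀ l ∈ PySem.Str.splitlines text,
    ¬ ((PySem.Str.strip l).toList.length = 1 ∧ (PySem.Str.strip l).toList.all PySem.Chars.isdigit = true)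
instance (text : String) : Decidable (Pre_format_questions_to_html text) := by
  unfold Pre_format_questions_to_html; infer_instance

def pvWitness_format_questions_to_html : String :=
  "1. Q?\na) x b) y\nc) z\n\n2. R?\nhello"

def Spec_format_questions_to_html (text : String) (out : String) : Prop := out = format_questions_to_html_alt text
instance (text : String) (out : String) : Decidable (Spec_format_questions_to_html text out) := by
  unfold Spec_format_questions_to_html; infer_instance

-- ===== CLAIM (what is proved, stated in full; the proofs are below) =====
def Claim_equal_format_questions_to_html : Prop := ∀ (text : String), Dom_format_questions_to_html text → Pre_format_questions_to_html text → Spec_format_questions_to_html text (format_questions_to_html text)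


-- ===== LEMMAS AND PROOFS =====
def pvClose : String := "</div>"
def pvHdr : String := "<div style=\"font-family: Arial; margin: 20px;\">"
def pvQ (s : String) : String := "<div style=\"margin-top: 15px; font-weight: bold;\">" ++ s ++ "</div><div style=\"margin-left: 20px;\">"
def pvO (s : String) : String := "<div>" ++ s ++ "</div>"

def pvIsQ (s : String) : Bool :=
  ((PySem.Str.pyGet? s 0).map PySem.Chars.isdigit).getD false && (PySem.Str.pyGet? s 1 == some '.')

theorem pvAux (x : List Char) (X : Bool) :
    (decide ((1:Int) < x.length) && X && (PySem.List.pyGet? x 1 == some '.'))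
    = (X && (PySem.List.pyGet? x 1 == some '.')) := by
  match x with
  | [] => simp [PySem.List.pyGet?, PySem.List.pyIdx?]
  | [a] => simp [PySem.List.pyGet?, PySem.List.pyIdx?]
  | a :: b :: t =>
    have h2 : ((1:Int) < (a :: b :: t).length) := by simp
    simp only [PySem.List.pyGet?, h2, decide_true, Bool.true_and]

-- the two ports' question tests agree: line[1] exists whenever it equals '.'
theorem pvIsQ_len (s : String) :
    (decide (1 < PySem.Str.len s) && ((PySem.Str.pyGet? s 0).map PySem.Chars.isdigit).getD false
      && (PySem.Str.pyGet? s 1 == some '.')) = pvIsQ s := by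
  unfold pvIsQ
  simp only [PySem.Str.len_eq, PySem.Str.pyGet?_eq, PySem.Chars.pyGet?_eq_listPyGet?]
  exact pvAux s.toList _

-- A's loop step, named
def pvStepA (st : List String × Option String) (line : String) : List String × Option String :=
  let line := PySem.Str.strip line
  if line = "" then st
  else if pvIsQ line then
    let html := if st.2.isSome then st.1 ++ ["</div>"] else st.1
    (html ++ ["<div style=\"margin-top: 15px; font-weight: bold;\">" ++ line ++ "</div><div style=\"margin-left: 20px;\">"],
     some line)
  else if PySem.Str.isIn " b) " line || PySem.Str.isIn " c) " line || PySem.Str.isIn " d) " line then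
    let parts := (PySem.Str.split?
      (PySem.Str.replace (PySem.Str.replace (PySem.Str.replace line " b) " "||b) ") " c) " "||c) ") " d) " "||d) ") "||").getD []
    (parts.foldl (fun h opt =>
        let opt := PySem.Str.strip opt
        if opt = "" then h else h ++ ["<div>" ++ opt ++ "</div>"]) st.1, st.2)
  else (st.1 ++ ["<div>" ++ line ++ "</div>"], st.2)

-- B's loop step, named
def pvStepB (st : List String × List (String × List String)) (raw : String) :
    List String × List (String × List String) :=
  let line := PySem.Str.strip raw
  if line = "" then st
  else if decide (1 < PySem.Str.len line)
          && ((PySem.Str.pyGet? line 0).map PySem.Chars.isdigit).getD false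
          && (PySem.Str.pyGet? line 1 == some '.') then
    (st.1, st.2 ++ [(line, [])])
  else match st.2 with
    | [] => (st.1 ++ pvOptionTexts line, st.2)
    | _ => (st.1, pvAppendLast st.2 (pvOptionTexts line))

-- pieces emitted by the remaining lines, last question div left open
def pvEmit : List String → Bool → List String
  | [], _ => []
  | l :: ls, inq =>
    let s := PySem.Str.strip l
    if s = "" then pvEmit ls inq
    else if pvIsQ s then (if inq then [pvClose] else []) ++ [pvQ s] ++ pvEmit ls true
    else (pvOptionTexts s).map pvO ++ pvEmit ls inq

-- whether a question div is open after the remaining lines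
def pvInq : List String → Bool → Bool
  | [], inq => inq
  | l :: ls, inq =>
    let s := PySem.Str.strip l
    if s = "" then pvInq ls inq
    else if pvIsQ s then pvInq ls true
    else pvInq ls inq

theorem pvOptsFold (parts : List String) (h : List String) :
    parts.foldl (fun h opt =>
      let opt := PySem.Str.strip opt
      if opt = "" then h else h ++ ["<div>" ++ opt ++ "</div>"]) h
    = h ++ ((parts.map PySem.Str.strip).filter (fun p => p ≠ "")).map pvO := by
  induction parts generalizing h with
  | nil => simp
  | cons p ps ih =>
    simp only [List.foldl_cons, List.map_cons, List.filter_cons]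
    by_cases hp : PySem.Str.strip p = ""
    · simp [hp, ih]
    · simp [hp, ih, pvO]

theorem pvALoop (lines : List String) (html : List String) (cq : Option String) :
    (lines.foldl pvStepA (html, cq)).1 = html ++ pvEmit lines cq.isSome ∧
    (lines.foldl pvStepA (html, cq)).2.isSome = pvInq lines cq.isSome := by
  induction lines generalizing html cq with
  | nil => simp [pvEmit, pvInq]
  | cons l ls ih =>
    simp only [List.foldl_cons]
    by_cases hs : PySem.Str.strip l = ""
    · rw [show pvStepA (html, cq) l = (html, cq) from by simp [pvStepA, hs]]
      simpa [pvEmit, pvInq, hs] using ih html cq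
    · by_cases hq : pvIsQ (PySem.Str.strip l) = true
      · rw [show pvStepA (html, cq) l
            = ((if cq.isSome then html ++ [pvClose] else html) ++ [pvQ (PySem.Str.strip l)],
               some (PySem.Str.strip l)) from by
          simp [pvStepA, hs, hq, pvClose, pvQ]]
        obtain ⟨ih1, ih2⟩ := ih _ (some (PySem.Str.strip l))
        constructor
        · rw [ih1]; cases hcq : cq.isSome <;> simp [pvEmit, hs, hq]
        · rw [ih2]; simp [pvInq, hs, hq]
      · have hstep : pvStepA (html, cq) l
            = (html ++ (pvOptionTexts (PySem.Str.strip l)).map pvO, cq) := by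
          simp [pvStepA, hs, hq, pvOptionTexts, pvOptsFold]
          split_ifs <;> simp [pvO]
        rw [hstep]
        obtain ⟨ih1, ih2⟩ := ih _ cq
        constructor
        · rw [ih1]; simp [pvEmit, hs, hq]
        · rw [ih2]; simp [pvInq, hs, hq]

def pvOpenGroups : List (String × List String) → List String
  | [] => []
  | [g] => pvQ g.1 :: g.2.map pvO
  | g :: g2 :: rest => (pvQ g.1 :: (g.2.map pvO ++ [pvClose])) ++ pvOpenGroups (g2 :: rest)

theorem pvFlatEq (groups : List (String × List String)) :
    groups.flatMap (fun g =>
      ("<div style=\"margin-top: 15px; font-weight: bold;\">" ++ g.1 ++ "</div><div style=\"margin-left: 20px;\">")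
      :: (g.2.map (fun o => "<div>" ++ o ++ "</div>") ++ ["</div>"]))
    = pvOpenGroups groups ++ (if groups.isEmpty then [] else [pvClose]) := by
  induction groups with
  | nil => simp [pvOpenGroups]
  | cons g rest ih =>
    cases rest with
    | nil => simp [pvOpenGroups, pvQ, pvO, pvClose]
    | cons g2 r2 =>
      simp [pvOpenGroups, pvQ, pvClose] at ih ⊢
      simp [ih, pvO]

theorem pvOgAppendQ (groups : List (String × List String)) (q : String) :
    pvOpenGroups (groups ++ [(q, [])])
    = pvOpenGroups groups ++ (if groups.isEmpty then [] else [pvClose]) ++ [pvQ q] := by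
  induction groups with
  | nil => simp [pvOpenGroups]
  | cons g rest ih =>
    cases rest with
    | nil => simp [pvOpenGroups]
    | cons g2 r2 => simp [pvOpenGroups] at ih ⊢; simp [ih]

theorem pvOpenGroups_cons (g : String × List String) (l : List (String × List String))
    (h : l ≠ []) :
    pvOpenGroups (g :: l) = (pvQ g.1 :: (g.2.map pvO ++ [pvClose])) ++ pvOpenGroups l := by
  cases l with
  | nil => simp at h
  | cons a t => rfl

theorem pvOgAppendLast (groups : List (String × List String)) (opts : List String)
    (h : groups ≠ []) :
    pvOpenGroups (pvAppendLast groups opts) = pvOpenGroups groups ++ opts.map pvO := by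
  induction groups with
  | nil => simp at h
  | cons g rest ih =>
    cases rest with
    | nil => simp [pvAppendLast, pvOpenGroups]
    | cons g2 r2 =>
      have hne : pvAppendLast (g2 :: r2) opts ≠ [] := by
        cases r2 <;> simp [pvAppendLast]
      simp only [pvAppendLast]
      rw [pvOpenGroups_cons _ _ hne, ih (by simp), pvOpenGroups_cons g (g2 :: r2) (by simp)]
      simp

theorem pvBLoop (lines : List String) (pre : List String) (groups : List (String × List String)) :
    (lines.foldl pvStepB (pre, groups)).1.map pvO ++ pvOpenGroups (lines.foldl pvStepB (pre, groups)).2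
      = pre.map pvO ++ pvOpenGroups groups ++ pvEmit lines (!groups.isEmpty) ∧
    (lines.foldl pvStepB (pre, groups)).2.isEmpty = !pvInq lines (!groups.isEmpty) := by
  induction lines generalizing pre groups with
  | nil => simp [pvEmit, pvInq]
  | cons l ls ih =>
    simp only [List.foldl_cons]
    have hcond := pvIsQ_len (PySem.Str.strip l)
    by_cases hs : PySem.Str.strip l = ""
    · rw [show pvStepB (pre, groups) l = (pre, groups) from by simp [pvStepB, hs]]
      simpa [pvEmit, pvInq, hs] using ih pre groups
    · by_cases hq : pvIsQ (PySem.Str.strip l) = true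
      · rw [show pvStepB (pre, groups) l = (pre, groups ++ [(PySem.Str.strip l, [])]) from by
          simp only [pvStepB]
          rw [if_neg hs, if_pos (hcond.trans hq)]]
        obtain ⟨ih1, ih2⟩ := ih pre (groups ++ [(PySem.Str.strip l, [])])
        constructor
        · rw [ih1, pvOgAppendQ]
          cases groups <;> simp [pvEmit, hs, hq]
        · rw [ih2]
          have he : (groups ++ [(PySem.Str.strip l, [])]).isEmpty = false := by
            cases groups <;> simp
          simp [pvInq, hs, hq, he]
      · cases groups with
        | nil =>
          rw [show pvStepB (pre, ([] : List (String × List String))) l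
              = (pre ++ pvOptionTexts (PySem.Str.strip l), []) from by
            simp only [pvStepB]
            rw [if_neg hs, if_neg (show ¬ _ from by rw [hcond]; exact hq)]]
          obtain ⟨ih1, ih2⟩ := ih (pre ++ pvOptionTexts (PySem.Str.strip l)) []
          constructor
          · rw [ih1]; simp [pvEmit, hs, hq, pvOpenGroups]
          · rw [ih2]; simp [pvInq, hs, hq]
        | cons g gs =>
          rw [show pvStepB (pre, g :: gs) l
              = (pre, pvAppendLast (g :: gs) (pvOptionTexts (PySem.Str.strip l))) from by
            simp only [pvStepB]
            rw [if_neg hs, if_neg (show ¬ _ from by rw [hcond]; exact hq)]]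
          obtain ⟨ih1, ih2⟩ := ih pre (pvAppendLast (g :: gs) (pvOptionTexts (PySem.Str.strip l)))
          have he : (pvAppendLast (g :: gs) (pvOptionTexts (PySem.Str.strip l))).isEmpty = false := by
            cases gs <;> simp [pvAppendLast]
          constructor
          · rw [ih1, pvOgAppendLast _ _ (by simp)]
            simp [pvEmit, hs, hq, he]
          · rw [ih2]; simp [pvInq, hs, hq, he]

-- ===== VERDICT (by name: the statement is the Claim_ definition above) =====
theorem format_questions_to_html_spec : Claim_equal_format_questions_to_html := by
  intro text _ _
  unfold Spec_format_questions_to_html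
  have hA : format_questions_to_html text
      = PySem.Str.join "\n"
        ((if ((PySem.Str.splitlines text).foldl pvStepA ([pvHdr], none)).2.isSome
            then ((PySem.Str.splitlines text).foldl pvStepA ([pvHdr], none)).1 ++ [pvClose]
            else ((PySem.Str.splitlines text).foldl pvStepA ([pvHdr], none)).1) ++ [pvClose]) := rfl
  have hB : format_questions_to_html_alt text
      = PySem.Str.join "\n"
        ([pvHdr]
         ++ ((PySem.Str.splitlines text).foldl pvStepB ([], [])).1.map pvO
         ++ ((PySem.Str.splitlines text).foldl pvStepB ([], [])).2.flatMap (fun g =>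
              ("<div style=\"margin-top: 15px; font-weight: bold;\">" ++ g.1 ++ "</div><div style=\"margin-left: 20px;\">")
              :: (g.2.map (fun o => "<div>" ++ o ++ "</div>") ++ ["</div>"]))
         ++ [pvClose]) := rfl
  rw [hA, hB, pvFlatEq]
  obtain ⟨a1, a2⟩ := pvALoop (PySem.Str.splitlines text) [pvHdr] none
  obtain ⟨b1, b2⟩ := pvBLoop (PySem.Str.splitlines text) [] []
  simp only [Option.isSome_none, List.isEmpty_nil, Bool.not_true, pvOpenGroups,
    List.map_nil, List.append_nil, List.nil_append] at a1 a2 b1 b2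
  congr 1
  rw [a1, a2, b2]
  cases hI : pvInq (PySem.Str.splitlines text) false
  · simp [b1]
  · simp [← List.append_assoc, b1]
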